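-- pv_equiv track=rewrite | github.com/ShurupuS/adventofcode23 | task_1.py | get_first_int
-- ===== SOURCE A (Python) =====
-- def get_first_int(s):
--     number_dict = {
--         "one": "1",
--         "two": "2",
--         "three": "3",
--         "four": "4",
--         "five": "5",
--         "six": "6",
--         "seven": "7",
--         "eight": "8",
--         "nine": "9"
--     }
--
--     i = 0
--     while i < len(s):
--         if s[i].isalpha():
--             for key in number_dict.keys():
--                 if s[i:].startswith(key):
--                     return int(number_dict[key])
--             else:
--                 i += 1
--         else:
--             return int(s[i])
--
--     return None
-- ===== SOURCE B (Python) =====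
-- def get_first_int(s):
--     # Two-phase: (1) index of first non-letter, (2) min str.find over the nine words.
--     words = ("one", "two", "three", "four", "five", "six", "seven", "eight", "nine")
--     j = next((i for i, c in enumerate(s) if not c.isalpha()), len(s))
--     best_k = -1
--     best_d = None
--     for d, w in enumerate(words, 1):
--         k = s.find(w)
--         if k != -1 and k < j and (best_k == -1 or k < best_k):
--             best_k, best_d = k, d
--     if best_d is not None:
--         return best_d
--     if j < len(s):
--         return int(s[j])
--     return None
-- ===== Notes on version B (the rewrite author's own statement) =====
-- stated objective: faster
-- what changed: A's single interleaved char-by-char scan (slicing and checking all nine word prefixes at each position) is replaced by two separate phases: the index of the first non-letter, then the minimum of the nine words' str.find start indices below that bound; the winner's digit, else int() of the first non-letter.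
import Mathlib
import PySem

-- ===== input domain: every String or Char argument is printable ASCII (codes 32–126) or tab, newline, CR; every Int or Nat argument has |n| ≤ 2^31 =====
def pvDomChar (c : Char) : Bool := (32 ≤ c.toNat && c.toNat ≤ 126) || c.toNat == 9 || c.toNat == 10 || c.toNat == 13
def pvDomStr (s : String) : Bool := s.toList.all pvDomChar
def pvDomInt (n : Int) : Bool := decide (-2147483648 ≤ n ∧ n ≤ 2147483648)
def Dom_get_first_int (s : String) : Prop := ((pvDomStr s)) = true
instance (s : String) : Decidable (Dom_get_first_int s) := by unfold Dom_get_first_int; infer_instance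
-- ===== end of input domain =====

-- B replaces A's single interleaved char-by-char scan by two phases: first non-letter index, then a
-- minimum over the nine words' str.find indices (objective: faster — the nine str.find scans run in C instead of a per-character Python loop).

-- ===== PORT A =====
def pvNumberDict : List (List Char × Int) :=
  [(['o','n','e'], 1), (['t','w','o'], 2), (['t','h','r','e','e'], 3), (['f','o','u','r'], 4),
   (['f','i','v','e'], 5), (['s','i','x'], 6), (['s','e','v','e','n'], 7), (['e','i','g','h','t'], 8),
   (['n','i','n','e'], 9)]

-- the while-loop of A, recursing on the suffix s[i:]
def pvGoA : List Char → Option Int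
  | [] => none
  | c :: rest =>
    if PySem.Chars.isalpha c then
      match pvNumberDict.find? (fun kv => PySem.Chars.startswith (c :: rest) kv.1) with
      | some kv => some kv.2          -- return int(number_dict[key])
      | none => pvGoA rest            -- i += 1
    else PySem.Int.ofChars? [c]       -- return int(s[i])  (none = ValueError, excluded by Pre_)

def get_first_int (s : String) : Option Int := pvGoA s.toList

-- ===== PORT B =====
def pvWordsB : List (List Char) :=
  [['o','n','e'], ['t','w','o'], ['t','h','r','e','e'], ['f','o','u','r'], ['f','i','v','e'],
   ['s','i','x'], ['s','e','v','e','n'], ['e','i','g','h','t'], ['n','i','n','e']]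

-- the body of B's for-loop over enumerate(words, 1)
def pvStepB (cs : List Char) (jI : Int) (best : Option (Int × Int)) (dw : Int × List Char) :
    Option (Int × Int) :=
  if PySem.Chars.find cs dw.2 != -1 && decide (PySem.Chars.find cs dw.2 < jI) &&
      (match best with | none => true | some b => decide (PySem.Chars.find cs dw.2 < b.1))
  then some (PySem.Chars.find cs dw.2, dw.1) else best

def get_first_int_alt (s : String) : Option Int :=
  let cs := s.toList
  let j : Nat := cs.findIdx (fun c => !(PySem.Chars.isalpha c))   -- next(…, len(s))
  match (PySem.List.enumerate pvWordsB 1).foldl (pvStepB cs (j : Int)) none with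
  | some b => some b.2
  | none =>
    if j < cs.length then PySem.Int.ofChars? [cs.getD j ' ']      -- return int(s[j])
    else none

-- ===== PRECONDITION & SPEC =====
-- Pre_ excludes exactly the inputs on which A raises ValueError: the first non-letter of s comes
-- before any spelled-out number word and is not a decimal digit (int(s[i]) fails there; B raises too).
-- Both ports map that raise to none, so the Lean equality happens to hold even there; Pre_ is kept
-- because the Python programs raise rather than return on those inputs.
def pvPreWords : List (List Char) :=
  [['o','n','e'], ['t','w','o'], ['t','h','r','e','e'], ['f','o','u','r'], ['f','i','v','e'],
   ['s','i','x'], ['s','e','v','e','n'], ['e','i','g','h','t'], ['n','i','n','e']]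

def Pre_get_first_int (s : String) : Prop :=
  let cs := s.toList
  let j := cs.findIdx (fun c => !(PySem.Chars.isalpha c))
  j < cs.length →
    (PySem.Chars.isdigit (cs.getD j ' ') = true ∨
     ∃ i ∈ List.range j, ∃ w ∈ pvPreWords, w <+: cs.drop i)
instance (s : String) : Decidable (Pre_get_first_int s) := by unfold Pre_get_first_int; infer_instance

def pvWitness_get_first_int : String := "ab1"

def Spec_get_first_int (s : String) (out : Option Int) : Prop := out = get_first_int_alt s
instance (s : String) (out : Option Int) : Decidable (Spec_get_first_int s out) := by
  unfold Spec_get_first_int; infer_instance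

-- ===== CLAIM (what is proved, stated in full; the proofs are below) =====
def Claim_equal_get_first_int : Prop :=
  ∀ (s : String), Dom_get_first_int s → Pre_get_first_int s →
    Spec_get_first_int s (get_first_int s)

-- ===== LEMMAS AND PROOFS =====

-- occurrence of some number word starting at position i of cs
def pvOccAt (cs : List Char) (i : Nat) : Bool :=
  decide (∃ kv ∈ pvNumberDict, kv.1 <+: cs.drop i)

-- index (before j) of the first position where a number word starts
def pvHit (cs : List Char) (j : Nat) : Option Nat := (List.range j).find? (pvOccAt cs)

theorem pvFind?_congr {α : Type} {p q : α → Bool} :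
    ∀ (L : List α), (∀ x ∈ L, p x = q x) → L.find? p = L.find? q := by
  intro L
  induction L with
  | nil => intro _; rfl
  | cons a L ih =>
    intro h
    simp only [List.find?_cons, h a (by simp)]
    cases hq : q a with
    | true => rfl
    | false => exact ih (fun x hx => h x (by simp [hx]))

theorem pvRangeFind?_none {p : Nat → Bool} {j : Nat}
    (h : (List.range j).find? p = none) : ∀ m < j, p m = false := by
  intro m hm
  have := List.find?_eq_none.mp h m (List.mem_range.mpr hm)
  simpa using this

theorem pvRangeFind?_some {p : Nat → Bool} :
    ∀ {j i : Nat}, (List.range j).find? p = some i →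
      p i = true ∧ i < j ∧ ∀ m < i, p m = false := by
  intro j
  induction j with
  | zero => intro i h; simp at h
  | succ j ih =>
    intro i h
    rw [List.range_succ, List.find?_append] at h
    cases hj : (List.range j).find? p with
    | some i' =>
      rw [hj] at h
      simp only [Option.some_or] at h
      obtain rfl : i' = i := by simpa using h
      obtain ⟨h1, h2, h3⟩ := ih hj
      exact ⟨h1, Nat.lt_succ_of_lt h2, h3⟩
    | none =>
      rw [hj] at h
      simp only [Option.or_none, Option.none_or] at h
      have hpi : p j = true ∧ i = j := by
        cases hpj : p j with
        | true =>
          refine ⟨rfl, ?_⟩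
          simp [List.find?_cons, hpj] at h
          omega
        | false => simp [List.find?_cons, hpj] at h
      obtain ⟨hpj, rfl⟩ := hpi
      exact ⟨hpj, Nat.lt_succ_self _, fun m hm => pvRangeFind?_none hj m hm⟩

-- characterization of A's interleaved scan
theorem pvGoA_eq : ∀ (cs : List Char),
    pvGoA cs =
      match pvHit cs (cs.findIdx (fun c => !(PySem.Chars.isalpha c))) with
      | some i =>
        (pvNumberDict.find? (fun kv => PySem.Chars.startswith (cs.drop i) kv.1)).map (·.2)
      | none =>
        if cs.findIdx (fun c => !(PySem.Chars.isalpha c)) < cs.length then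
          PySem.Int.ofChars? [cs.getD (cs.findIdx (fun c => !(PySem.Chars.isalpha c))) ' ']
        else none := by
  intro cs
  induction cs with
  | nil => simp [pvGoA, pvHit, List.range_zero]
  | cons c rest ih =>
    by_cases ha : PySem.Chars.isalpha c = true
    · -- alpha head: findIdx = succ
      have hfi : (c :: rest).findIdx (fun c => !(PySem.Chars.isalpha c)) =
          rest.findIdx (fun c => !(PySem.Chars.isalpha c)) + 1 := by
        simp [List.findIdx_cons, ha]
      rw [hfi]
      cases hf : pvNumberDict.find? (fun kv => PySem.Chars.startswith (c :: rest) kv.1) with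
      | some kv =>
        -- match at position 0
        have hocc : pvOccAt (c :: rest) 0 = true := by
          have hm := List.mem_of_find?_eq_some hf
          have hp := List.find?_some hf
          rw [PySem.Chars.startswith_iff] at hp
          simp only [pvOccAt, decide_eq_true_eq]
          exact ⟨kv, hm, by simpa using hp⟩
        have : pvHit (c :: rest) (rest.findIdx (fun c => !(PySem.Chars.isalpha c)) + 1) = some 0 := by
          unfold pvHit
          rw [List.range_succ_eq_map]
          simp [List.find?_cons, hocc]
        rw [this]
        simp [pvGoA, ha, hf]
      | none =>
        have hocc : pvOccAt (c :: rest) 0 = false := by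
          have := List.find?_eq_none.mp hf
          simp only [pvOccAt, decide_eq_false_iff_not]
          rintro ⟨kv, hmem, hpre⟩
          exact (this kv hmem) (by simpa [PySem.Chars.startswith_iff] using hpre)
        have hshift : pvHit (c :: rest) (rest.findIdx (fun c => !(PySem.Chars.isalpha c)) + 1) =
            (pvHit rest (rest.findIdx (fun c => !(PySem.Chars.isalpha c)))).map Nat.succ := by
          unfold pvHit
          rw [List.range_succ_eq_map]
          simp only [List.find?_cons, hocc]
          rw [List.find?_map]
          congr 1
        rw [hshift]
        have hgoa : pvGoA (c :: rest) = pvGoA rest := by simp [pvGoA, ha, hf]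
        rw [hgoa, ih]
        cases hh : pvHit rest (rest.findIdx (fun c => !(PySem.Chars.isalpha c))) with
        | some i => simp [List.drop_succ_cons]
        | none => simp
    · -- non-alpha head: findIdx = 0
      have hfi : (c :: rest).findIdx (fun c => !(PySem.Chars.isalpha c)) = 0 := by
        simp [List.findIdx_cons, ha]
      rw [hfi]
      have : pvHit (c :: rest) 0 = none := by simp [pvHit, List.range_zero]
      rw [this]
      simp [pvGoA, ha]

-- pvNumberDict is pvWordsB enumerated from 1, pairs swapped
def pvPairs : List (Int × List Char) := PySem.List.enumerate pvWordsB 1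

theorem pvPairs_swap : pvNumberDict = pvPairs.map (fun p => (p.2, p.1)) := by decide

theorem pvFoldB_none (cs : List Char) (jI : Int) :
    ∀ L : List (Int × List Char),
      (∀ p ∈ L, ¬(PySem.Chars.find cs p.2 ≠ -1 ∧ PySem.Chars.find cs p.2 < jI)) →
      L.foldl (pvStepB cs jI) none = none := by
  intro L
  induction L with
  | nil => intro _; rfl
  | cons a L ih =>
    intro h
    have ha := h a (by simp)
    have hstep : pvStepB cs jI none a = none := by
      unfold pvStepB
      have : ¬(PySem.Chars.find cs a.2 != -1 &&
          decide (PySem.Chars.find cs a.2 < jI) && true) = true := by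
        simp only [Bool.and_true, Bool.and_eq_true, bne_iff_ne, decide_eq_true_eq]
        exact ha
      simp only [Bool.not_eq_true] at this
      simp [this]
    simp only [List.foldl_cons, hstep]
    exact ih (fun p hp => h p (by simp [hp]))

theorem pvFoldB_stay (cs : List Char) (jI i0 d : Int) :
    ∀ L : List (Int × List Char),
      (∀ p ∈ L, (PySem.Chars.find cs p.2 ≠ -1 ∧ PySem.Chars.find cs p.2 < jI) →
        i0 ≤ PySem.Chars.find cs p.2) →
      L.foldl (pvStepB cs jI) (some (i0, d)) = some (i0, d) := by
  intro L
  induction L with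
  | nil => intro _; rfl
  | cons a L ih =>
    intro h
    have hstep : pvStepB cs jI (some (i0, d)) a = some (i0, d) := by
      unfold pvStepB
      by_cases hc : (PySem.Chars.find cs a.2 ≠ -1 ∧ PySem.Chars.find cs a.2 < jI)
      · have hge := h a (by simp) hc
        have : ¬ PySem.Chars.find cs a.2 < i0 := by omega
        simp [this]
      · have : ¬(PySem.Chars.find cs a.2 != -1 &&
            decide (PySem.Chars.find cs a.2 < jI) &&
            decide (PySem.Chars.find cs a.2 < i0)) = true := by
          simp only [Bool.and_eq_true, bne_iff_ne, decide_eq_true_eq]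
          tauto
        simp only [Bool.not_eq_true] at this
        simp [this]
    simp only [List.foldl_cons, hstep]
    exact ih (fun p hp => h p (by simp [hp]))

theorem pvFoldB_main (cs : List Char) (jI i0 : Int) (h0 : 0 ≤ i0) (hj : i0 < jI) :
    ∀ (L : List (Int × List Char)) (best : Option (Int × Int)),
      (best = none ∨ ∃ k' d', best = some (k', d') ∧ i0 < k') →
      (∀ p ∈ L, (PySem.Chars.find cs p.2 ≠ -1 ∧ PySem.Chars.find cs p.2 < jI) →
        i0 ≤ PySem.Chars.find cs p.2) →
      ∀ p₀, L.find? (fun p => PySem.Chars.find cs p.2 == i0) = some p₀ →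
      L.foldl (pvStepB cs jI) best = some (i0, p₀.1) := by
  intro L
  induction L with
  | nil => intro best _ _ p₀ h; simp at h
  | cons a L ih =>
    intro best hbest hmin p₀ hfind
    by_cases hk : PySem.Chars.find cs a.2 = i0
    · -- head wins: step fires and then stays
      obtain rfl : a = p₀ := by
        rw [List.find?_cons, show (PySem.Chars.find cs a.2 == i0) = true by simp [hk]] at hfind
        simpa using hfind
      have hne : i0 ≠ -1 := by omega
      have hfire : pvStepB cs jI best a = some (i0, a.1) := by
        rcases hbest with rfl | ⟨k', d', rfl, hlt⟩
        · simp [pvStepB, hk, hj, hne]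
        · simp [pvStepB, hk, hj, hne, hlt]
      simp only [List.foldl_cons, hfire]
      exact pvFoldB_stay cs jI i0 a.1 L (fun p hp => hmin p (by simp [hp]))
    · -- head does not have find = i0
      have hfind' : L.find? (fun p => PySem.Chars.find cs p.2 == i0) = some p₀ := by
        rw [List.find?_cons, show (PySem.Chars.find cs a.2 == i0) = false by simp [hk]] at hfind
        exact hfind
      have hbest' : pvStepB cs jI best a = none ∨
          ∃ k' d', pvStepB cs jI best a = some (k', d') ∧ i0 < k' := by
        rcases hbest with rfl | ⟨k', d', rfl, hlt⟩
        · by_cases hc : (PySem.Chars.find cs a.2 != -1 &&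
              decide (PySem.Chars.find cs a.2 < jI)) = true
          · right
            refine ⟨PySem.Chars.find cs a.2, a.1, by simp [pvStepB, hc], ?_⟩
            simp only [Bool.and_eq_true, bne_iff_ne, decide_eq_true_eq] at hc
            have := hmin a (by simp) ⟨hc.1, hc.2⟩
            omega
          · left
            simp only [Bool.not_eq_true] at hc
            simp [pvStepB, hc]
        · by_cases hc : (PySem.Chars.find cs a.2 != -1 &&
              decide (PySem.Chars.find cs a.2 < jI) &&
              decide (PySem.Chars.find cs a.2 < k')) = true
          · right
            refine ⟨PySem.Chars.find cs a.2, a.1, by simp [pvStepB, hc], ?_⟩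
            simp only [Bool.and_eq_true, bne_iff_ne, decide_eq_true_eq] at hc
            have := hmin a (by simp) ⟨hc.1.1, hc.1.2⟩
            omega
          · right
            refine ⟨k', d', ?_, hlt⟩
            simp only [Bool.not_eq_true] at hc
            simp [pvStepB, hc]
      simp only [List.foldl_cons]
      exact ih _ hbest' (fun p hp => hmin p (by simp [hp])) p₀ hfind'

-- a number-word prefix of a drop is an infix of the whole list
theorem pvPrefixDropInfix {w cs : List Char} {i : Nat} (h : w <+: cs.drop i) : w <:+: cs :=
  h.isInfix.trans (List.drop_suffix i cs).isInfix

-- under minimality of i0, find = i0 on a word iff the word starts at i0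
theorem pvKeyIff (cs : List Char) (j i0 : Nat) (hij : i0 < j)
    (hmin : ∀ m < i0, pvOccAt cs m = false) :
    ∀ p ∈ pvPairs,
      (PySem.Chars.find cs p.2 == (i0 : Int)) =
        PySem.Chars.startswith (cs.drop i0) p.2 := by
  intro p hp
  have hmem : (p.2, p.1) ∈ pvNumberDict := by
    rw [pvPairs_swap]; exact List.mem_map.mpr ⟨p, hp, rfl⟩
  by_cases hs : p.2 <+: cs.drop i0
  · -- word starts at i0 ⇒ find = i0
    have hne : PySem.Chars.find cs p.2 ≠ -1 :=
      (PySem.Chars.find_ne_neg_one_iff cs p.2).mpr (pvPrefixDropInfix hs)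
    have hge : (0:Int) ≤ PySem.Chars.find cs p.2 := by
      have := PySem.Chars.neg_one_le_find cs p.2; omega
    obtain ⟨hpre, hmin'⟩ := PySem.Chars.find_spec hge
    have h1 : ¬ (PySem.Chars.find cs p.2).toNat < i0 := by
      intro hlt
      have : pvOccAt cs (PySem.Chars.find cs p.2).toNat = true := by
        simp only [pvOccAt, decide_eq_true_eq]; exact ⟨(p.2, p.1), hmem, hpre⟩
      rw [hmin _ hlt] at this; exact Bool.false_ne_true this
    have h2 : ¬ i0 < (PySem.Chars.find cs p.2).toNat := fun hlt => hmin' i0 hlt hs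
    have : (PySem.Chars.find cs p.2).toNat = i0 := by omega
    have hfk : PySem.Chars.find cs p.2 = (i0 : Int) := by omega
    simp [hfk, PySem.Chars.startswith_iff, hs]
  · -- word does not start at i0 ⇒ find ≠ i0
    have : PySem.Chars.find cs p.2 ≠ (i0 : Int) := by
      intro hk
      have hge : (0:Int) ≤ PySem.Chars.find cs p.2 := by omega
      obtain ⟨hpre, _⟩ := PySem.Chars.find_spec hge
      rw [hk] at hpre
      exact hs (by simpa using hpre)
    have hsf : PySem.Chars.startswith (cs.drop i0) p.2 = false := by
      rw [← Bool.not_eq_true, PySem.Chars.startswith_iff]; exact hs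
    rw [hsf]
    simpa using this

-- cond implies find lands on an occurrence below j
theorem pvCondOcc (cs : List Char) (j : Nat) (p : Int × List Char) (hp : p ∈ pvPairs)
    (hc : PySem.Chars.find cs p.2 ≠ -1 ∧ PySem.Chars.find cs p.2 < (j : Int)) :
    pvOccAt cs (PySem.Chars.find cs p.2).toNat = true ∧
      (PySem.Chars.find cs p.2).toNat < j := by
  have hmem : (p.2, p.1) ∈ pvNumberDict := by
    rw [pvPairs_swap]; exact List.mem_map.mpr ⟨p, hp, rfl⟩
  have hge : (0:Int) ≤ PySem.Chars.find cs p.2 := by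
    have := PySem.Chars.neg_one_le_find cs p.2; omega
  obtain ⟨hpre, _⟩ := PySem.Chars.find_spec hge
  refine ⟨by simp only [pvOccAt, decide_eq_true_eq]; exact ⟨(p.2, p.1), hmem, hpre⟩, by omega⟩

-- ===== VERDICT (by name: the statement is the Claim_ definition above) =====
theorem get_first_int_spec : Claim_equal_get_first_int := by
  unfold Claim_equal_get_first_int
  intro s _ _
  unfold Spec_get_first_int get_first_int get_first_int_alt
  rw [pvGoA_eq]
  set cs := s.toList with hcs
  set j := cs.findIdx (fun c => !(PySem.Chars.isalpha c)) with hjdef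
  show (match pvHit cs j with
    | some i =>
      (pvNumberDict.find? (fun kv : List Char × Int =>
        PySem.Chars.startswith (cs.drop i) kv.1)).map (fun kv : List Char × Int => kv.2)
    | none => if j < cs.length then PySem.Int.ofChars? [cs.getD j ' '] else none) = _
  cases hh : pvHit cs j with
  | none =>
    have hnone := pvRangeFind?_none hh
    have hfold : pvPairs.foldl (pvStepB cs (j : Int)) none = none := by
      apply pvFoldB_none
      intro p hp hc
      obtain ⟨hocc, hlt⟩ := pvCondOcc cs j p hp hc
      rw [hnone _ hlt] at hocc
      exact Bool.false_ne_true hocc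
    show _ = (match pvPairs.foldl (pvStepB cs (j : Int)) none with
      | some b => some b.2
      | none => if j < cs.length then PySem.Int.ofChars? [cs.getD j ' '] else none)
    rw [hfold]
  | some i0 =>
    obtain ⟨hocc, hij, hminr⟩ := pvRangeFind?_some hh
    -- A's value: the first matching word at i0
    have hsome : (pvNumberDict.find?
        (fun kv => PySem.Chars.startswith (cs.drop i0) kv.1)).isSome = true := by
      rw [List.find?_isSome]
      simp only [pvOccAt, decide_eq_true_eq] at hocc
      obtain ⟨kv, hmem, hpre⟩ := hocc
      exact ⟨kv, hmem, (PySem.Chars.startswith_iff _ _).mpr hpre⟩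
    obtain ⟨kvs, hkv⟩ := Option.isSome_iff_exists.mp hsome
    -- transfer A's find? over the dict to B's find? over the pairs
    have htrans : pvPairs.find? (fun p => PySem.Chars.find cs p.2 == (i0 : Int)) =
        some (kvs.2, kvs.1) := by
      have h1 : pvNumberDict.find? (fun kv => PySem.Chars.startswith (cs.drop i0) kv.1) =
          (pvPairs.find? (fun p => PySem.Chars.startswith (cs.drop i0) p.2)).map
            (fun p => (p.2, p.1)) := by
        rw [pvPairs_swap, List.find?_map]; rfl
      have h2 : pvPairs.find? (fun p => PySem.Chars.startswith (cs.drop i0) p.2) =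
          pvPairs.find? (fun p => PySem.Chars.find cs p.2 == (i0 : Int)) :=
        (pvFind?_congr _ (pvKeyIff cs j i0 hij hminr)).symm
      rw [h1, h2] at hkv
      cases hfp : pvPairs.find? (fun p => PySem.Chars.find cs p.2 == (i0 : Int)) with
      | none => rw [hfp] at hkv; simp at hkv
      | some p₀ =>
        rw [hfp] at hkv
        simp only [Option.map_some] at hkv
        obtain rfl : (p₀.2, p₀.1) = kvs := by simpa using hkv
        rfl
    have hfold : pvPairs.foldl (pvStepB cs (j : Int)) none = some ((i0 : Int), kvs.2) := by
      have := pvFoldB_main cs (j : Int) (i0 : Int) (by positivity) (by exact_mod_cast hij)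
        pvPairs none (Or.inl rfl)
        (fun p hp hc => by
          obtain ⟨hocc', hlt'⟩ := pvCondOcc cs j p hp hc
          have hge : ¬ (PySem.Chars.find cs p.2).toNat < i0 := by
            intro hlt
            rw [hminr _ hlt] at hocc'
            exact Bool.false_ne_true hocc'
          have h0 : (0:Int) ≤ PySem.Chars.find cs p.2 := by
            have := PySem.Chars.neg_one_le_find cs p.2; omega
          omega)
        (kvs.2, kvs.1) htrans
      simpa using this
    show _ = (match pvPairs.foldl (pvStepB cs (j : Int)) none with
      | some b => some b.2
      | none => if j < cs.length then PySem.Int.ofChars? [cs.getD j ' '] else none)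
    rw [hfold]
    simp [hkv]
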